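-- pv_equiv track=rewrite | github.com/z0n6/WordMaster | utils.py | _analyze_repeat_char_freq
-- ===== SOURCE A (Python) =====
-- from collections import Counter
--
-- def _analyze_repeat_char_freq(words):
--     char_count = Counter()
--     for word in words:
--         word_char_count = Counter(word.lower())
--         for char, freq in word_char_count.items():
--             for f in range(1, 1 + freq):
--                 char_count[char * f] += 1
--     return char_count
-- ===== SOURCE B (Python) =====
-- from collections import Counter
--
-- def _word_keys(w):
--     # recursively peel the first character: emit c*1..c*count, recurse on w without c
--     if not w:
--         return []
--     c = w[0]
--     k = w.count(c)
--     return [c * f for f in range(1, k + 1)] + _word_keys(w.replace(c, ''))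
--
-- def _analyze_repeat_char_freq(words):
--     keys = []
--     for word in words:
--         keys += _word_keys(word.lower())
--     return Counter(keys)
-- ===== Notes on version B (the rewrite author's own statement) =====
-- stated objective: alternative
-- what changed: A updates a global Counter inside three nested loops (per-word Counter, its items, a range per item); B generates each word's repeated-prefix keys by a recursive peel-first-char helper (count + remove-all), concatenates them, and builds the result with a single Counter call at the end.
import Mathlib
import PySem

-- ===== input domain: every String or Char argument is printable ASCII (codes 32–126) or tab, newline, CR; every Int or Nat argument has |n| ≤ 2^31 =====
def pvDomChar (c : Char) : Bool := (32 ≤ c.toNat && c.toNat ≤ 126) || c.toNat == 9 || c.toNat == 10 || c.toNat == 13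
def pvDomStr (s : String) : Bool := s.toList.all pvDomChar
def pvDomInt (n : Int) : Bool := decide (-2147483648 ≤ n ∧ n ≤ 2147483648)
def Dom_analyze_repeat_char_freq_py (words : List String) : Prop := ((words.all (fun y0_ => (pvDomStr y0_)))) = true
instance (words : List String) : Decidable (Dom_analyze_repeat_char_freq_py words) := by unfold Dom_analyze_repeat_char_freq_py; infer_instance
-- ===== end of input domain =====

-- B replaces A's per-word Counter + nested items/range loops updating a global counter by a
-- recursive peel-first-char key generator per word, concatenated and counted once at the end
-- (alternative decomposition, same cost).


-- char * f (f ≥ 1 here): Python string repetition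
def pvRep (c : Char) (f : Int) : String := String.ofList (PySem.List.pyRepeat [c] f)

def pvWordKeys : List Char → List String
  | [] => []
  | c :: t =>
      ((PySem.List.pyRange 1 ((((c :: t).count c : Int)) + 1) 1).map (fun f => pvRep c f))
        ++ pvWordKeys (t.filter (· ≠ c))
termination_by l => l.length
decreasing_by
  simp only [List.length_unattach, List.length_cons]
  exact Nat.lt_succ_of_le (le_trans (List.length_filter_le _ _) (le_of_eq (List.length_attach)))


-- ===== PORT A =====
-- char_count[char*f] += 1 on a Counter is char_count[k] = char_count.get(k, 0) + 1
def analyze_repeat_char_freq_py (words : List String) : List (String × Int) :=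
  (words.foldl (fun char_count word =>
      let word_char_count := PySem.Dict.counter (PySem.Str.lower word).toList
      word_char_count.items.foldl (fun char_count cf =>
        (PySem.List.pyRange 1 (1 + cf.2) 1).foldl (fun char_count f =>
          char_count.insert (pvRep cf.1 f) (char_count.getD (pvRep cf.1 f) 0 + 1)) char_count)
        char_count)
    PySem.Dict.empty).items

-- ===== PORT B =====

def analyze_repeat_char_freq_py_alt (words : List String) : List (String × Int) :=
  let keys := words.foldl (fun keys word => keys ++ pvWordKeys (PySem.Str.lower word).toList) []
  (PySem.Dict.counter keys).items

-- ===== PRECONDITION & SPEC =====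
def Spec_analyze_repeat_char_freq_py (words : List String) (out : List (String × Int)) : Prop := out = analyze_repeat_char_freq_py_alt words
instance (words : List String) (out : List (String × Int)) : Decidable (Spec_analyze_repeat_char_freq_py words out) := by unfold Spec_analyze_repeat_char_freq_py; infer_instance

-- ===== CLAIM (what is proved, stated in full; the proofs are below) =====
def Claim_equal_analyze_repeat_char_freq_py : Prop := ∀ (words : List String), Dom_analyze_repeat_char_freq_py words → Spec_analyze_repeat_char_freq_py words (analyze_repeat_char_freq_py words)

-- ===== LEMMAS AND PROOFS =====

theorem pv_discard_ofList (c : Char) (t : List Char) :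
    (PySem.Set.ofList t).discard c = PySem.Set.ofList (t.filter (· ≠ c)) := by
  induction t with
  | nil => rfl
  | cons x s ih =>
      simp only [PySem.Set.discard, ne_eq, decide_not] at ih ⊢
      by_cases hx : x = c
      · subst hx
        simp only [PySem.Set.ofList_cons, PySem.Set.discard, List.filter_cons]
        rw [if_neg (by simp), if_neg (by simp)]
        rw [← ih]
        simp [List.filter_filter]
      · simp only [PySem.Set.ofList_cons, PySem.Set.discard, List.filter_cons]
        rw [if_pos (by simp [hx]), if_pos (by simp [hx])]
        rw [PySem.Set.ofList_cons]
        simp only [PySem.Set.discard]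
        congr 1
        rw [← ih]
        exact List.filter_comm _ _ _

theorem pv_ofList_cons_filter (c : Char) (t : List Char) :
    PySem.Set.ofList (c :: t) = c :: PySem.Set.ofList (t.filter (· ≠ c)) := by
  rw [PySem.Set.ofList_cons, pv_discard_ofList]

-- B's per-word key list, characterised over the ordered distinct chars of the word
theorem pv_wordKeys_eq_aux (n : Nat) :
    ∀ (l : List Char), l.length ≤ n →
      pvWordKeys l
        = (PySem.Set.ofList l).flatMap
            (fun c => (PySem.List.pyRange 1 ((l.count c : Int) + 1) 1).map (fun f => pvRep c f)) := by
  induction n with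
  | zero =>
      intro l hl
      have : l = [] := List.eq_nil_of_length_eq_zero (Nat.le_zero.mp hl)
      subst this; rw [pvWordKeys]; simp
  | succ n ih =>
      intro l hl
      match l with
      | [] => rw [pvWordKeys]; simp
      | c :: t =>
          rw [pvWordKeys, pv_ofList_cons_filter, List.flatMap_cons]
          congr 1
          have hlen : (t.filter (· ≠ c)).length ≤ n := by
            have := List.length_filter_le (fun x => decide (x ≠ c)) t
            simp only [List.length_cons] at hl
            omega
          rw [ih _ hlen]
          apply List.flatMap_congr
          intro x hx
          have hxc : x ≠ c := by
            rw [PySem.Set.mem_ofList] at hx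
            have := List.of_mem_filter hx
            simpa using this
          have h1 : List.count x (List.filter (fun x => decide (x ≠ c)) t) = List.count x t := by
            simp [List.count_filter, hxc]
          have h2 : List.count x (c :: t) = List.count x t := by
            simp [Ne.symm hxc]
          rw [h1, h2]

theorem pv_foldl_flatMap {α β γ δ : Type} (g : β → List γ) (h : β → γ → δ) (inc : α → δ → α) :
    ∀ (l : List β) (a : α),
      l.foldl (fun a b => (g b).foldl (fun a x => inc a (h b x)) a) a
        = (l.flatMap (fun b => (g b).map (h b))).foldl inc a := by
  intro l
  induction l with
  | nil => intro a; rfl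
  | cons b t ih =>
      intro a
      simp only [List.foldl_cons, List.flatMap_cons, List.foldl_append, List.foldl_map, ih]

theorem pv_counter_step (xs : List String) (k : String) :
    (PySem.Dict.counter xs).insert k ((PySem.Dict.counter xs).getD k 0 + 1)
      = PySem.Dict.counter (xs ++ [k]) := by
  rw [← PySem.Dict.foldl_insert_getD_add_one_eq_counter,
      ← PySem.Dict.foldl_insert_getD_add_one_eq_counter]
  simp [List.foldl_append]

theorem pv_foldl_inc (keys : List String) :
    ∀ (xs : List String),
      keys.foldl (fun d k => d.insert k (d.getD k 0 + 1)) (PySem.Dict.counter xs)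
        = PySem.Dict.counter (xs ++ keys) := by
  induction keys with
  | nil => intro xs; simp
  | cons k t ih =>
      intro xs
      simp only [List.foldl_cons]
      rw [pv_counter_step, ih]
      simp

-- A's per-word emission list equals B's pvWordKeys
theorem pv_emit_eq (lw : List Char) :
    (PySem.Dict.counter lw).items.flatMap
        (fun cf => (PySem.List.pyRange 1 (1 + cf.2) 1).map (fun f => pvRep cf.1 f))
      = pvWordKeys lw := by
  rw [PySem.Dict.items_counter, List.flatMap_map, pv_wordKeys_eq_aux lw.length lw le_rfl]
  apply List.flatMap_congr
  intro x _
  have : (1 : Int) + (lw.count x : Int) = (lw.count x : Int) + 1 := by ring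
  simp [this]

-- the whole of A's loop, started from counter xs, counts xs ++ all emitted keys
theorem pv_A_loop (t : List String) :
    ∀ (xs : List String),
      t.foldl (fun char_count word =>
          let word_char_count := PySem.Dict.counter (PySem.Str.lower word).toList
          word_char_count.items.foldl (fun char_count cf =>
            (PySem.List.pyRange 1 (1 + cf.2) 1).foldl (fun char_count f =>
              char_count.insert (pvRep cf.1 f) (char_count.getD (pvRep cf.1 f) 0 + 1)) char_count)
            char_count)
        (PySem.Dict.counter xs)
      = PySem.Dict.counter (xs ++ t.flatMap (fun word => pvWordKeys (PySem.Str.lower word).toList)) := by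
  induction t with
  | nil => intro xs; simp
  | cons w t ih =>
      intro xs
      simp only [List.foldl_cons]
      have hflat := pv_foldl_flatMap (fun cf : Char × Int => PySem.List.pyRange 1 (1 + cf.2) 1)
            (fun cf f => pvRep cf.1 f)
            (fun (d : PySem.Dict String Int) k => d.insert k (d.getD k 0 + 1))
            (PySem.Dict.counter (PySem.Str.lower w).toList).items (PySem.Dict.counter xs)
      rw [hflat, pv_emit_eq, pv_foldl_inc, ih, List.flatMap_cons, List.append_assoc]

-- ===== VERDICT (by name: the statement is the Claim_ definition above) =====
theorem analyze_repeat_char_freq_py_spec : Claim_equal_analyze_repeat_char_freq_py := by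
  intro words _
  unfold Spec_analyze_repeat_char_freq_py analyze_repeat_char_freq_py analyze_repeat_char_freq_py_alt
  congr 1
  have hkeys : words.foldl (fun keys word => keys ++ pvWordKeys (PySem.Str.lower word).toList) []
      = words.flatMap (fun word => pvWordKeys (PySem.Str.lower word).toList) := by
    simpa using PySem.List.foldl_append_eq_flatMap
      (fun word => pvWordKeys (PySem.Str.lower word).toList) words []
  rw [hkeys]
  have h := pv_A_loop words []
  simpa using h
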